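-- pv_equiv track=rewrite | github.com/Rafaca81/PreworkPython-RafaelCasanova | Ejercicio/nivel_basico.py | sumar_digitos
-- ===== SOURCE A (Python) =====
-- def sumar_digitos(numero):
--     suma = 0
--     numero_absoluto = abs(numero)
--     while numero_absoluto > 0:
--         digito = numero_absoluto % 10
--         suma += digito
--         numero_absoluto //= 10
--     return suma
-- ===== SOURCE B (Python) =====
-- def sumar_digitos(numero):
--     return sum(int(c) for c in str(abs(numero)))
-- ===== Notes on version B (the rewrite author's own statement) =====
-- stated objective: idiomatic
-- what changed: Replaces the arithmetic modulus/floor-division digit-extraction loop with a one-line sum over the characters of the decimal string of the absolute value.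
import Mathlib
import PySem

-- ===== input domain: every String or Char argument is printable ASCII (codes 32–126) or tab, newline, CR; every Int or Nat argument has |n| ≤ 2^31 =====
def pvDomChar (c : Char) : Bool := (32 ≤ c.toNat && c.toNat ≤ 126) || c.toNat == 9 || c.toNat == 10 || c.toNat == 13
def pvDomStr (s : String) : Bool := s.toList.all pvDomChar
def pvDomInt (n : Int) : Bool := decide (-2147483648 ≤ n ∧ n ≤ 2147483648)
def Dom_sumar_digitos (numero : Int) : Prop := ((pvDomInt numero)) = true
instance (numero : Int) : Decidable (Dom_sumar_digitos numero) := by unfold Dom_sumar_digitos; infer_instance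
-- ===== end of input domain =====

-- B replaces A's arithmetic digit-extraction loop with summing int(c) over the decimal string of the absolute value (idiomatic, same cost).

-- ===== PORT A =====
-- the `while numero_absoluto > 0` loop, carrying (numero_absoluto, suma)
def pvLoopA (na suma : Int) : Int :=
  if na > 0 then
    pvLoopA (PySem.Int.floordiv na 10) (suma + PySem.Int.mod na 10)
  else suma
termination_by na.toNat
decreasing_by
  simp only [PySem.Int.floordiv, Int.fdiv_eq_ediv]
  simp only [show ((0:Int) ≤ 10 ∨ (10:Int) ∣ na) = True by simp, if_true]
  omega

def sumar_digitos (numero : Int) : Int := pvLoopA |numero| 0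

-- ===== PORT B =====
-- sum(int(c) for c in str(abs(numero)))
def sumar_digitos_alt (numero : Int) : Int :=
  (PySem.Int.toStr |numero|).toList.foldl
    (fun acc c => acc + (PySem.Int.ofStr? (String.ofList [c])).getD 0) 0

-- ===== PRECONDITION & SPEC =====
def Spec_sumar_digitos (numero : Int) (out : Int) : Prop := out = sumar_digitos_alt numero
instance (numero : Int) (out : Int) : Decidable (Spec_sumar_digitos numero out) := by unfold Spec_sumar_digitos; infer_instance

-- ===== CLAIM (what is proved, stated in full; the proofs are below) =====
def Claim_equal_sumar_digitos : Prop := ∀ (numero : Int), Dom_sumar_digitos numero → Spec_sumar_digitos numero (sumar_digitos numero)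

-- ===== LEMMAS AND PROOFS =====

-- int(str of a single decimal digit char) = the digit
lemma pv_val_digitChar (d : Nat) (hd : d < 10) :
    (PySem.Int.ofStr? (String.ofList [Nat.digitChar d])).getD 0 = (d : Int) := by
  interval_cases d <;> decide

-- A's loop computes the base-10 digit sum
lemma pvLoopA_eq (m : Nat) : ∀ s : Int, pvLoopA (↑m) s = s + ↑((Nat.digits 10 m).sum) := by
  induction m using Nat.strong_induction_on with
  | _ m ih =>
    intro s
    rw [pvLoopA.eq_def]
    by_cases hm : 0 < m
    · have h10 : (PySem.Int.floordiv (↑m) 10) = ((m / 10 : Nat) : Int) := by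
        simp [PySem.Int.floordiv, Int.fdiv_eq_ediv]
      have hmod : (PySem.Int.mod (↑m) 10) = ((m % 10 : Nat) : Int) := by
        simp [PySem.Int.mod, Int.fmod_eq_emod]
      have hlt : m / 10 < m := Nat.div_lt_self hm (by norm_num)
      simp only [show ((m:Int) > 0) = True by simp [hm], if_true, h10, hmod,
        ih (m / 10) hlt]
      rw [Nat.digits_def' (by norm_num : 1 < 10) hm]
      simp only [List.sum_cons]
      push_cast
      ring
    · have hm0 : m = 0 := by omega
      simp [hm0]

-- folding the digit-value sum over a list of digit chars
lemma pv_fold_digits (l : List Nat) (hl : ∀ d ∈ l, d < 10) : ∀ s : Int,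
    (l.map Nat.digitChar).foldl
      (fun acc c => acc + (PySem.Int.ofStr? (String.ofList [c])).getD 0) s
      = s + ↑l.sum := by
  induction l with
  | nil => intro s; simp
  | cons d t ih =>
    intro s
    simp only [List.map_cons, List.foldl_cons, List.sum_cons]
    rw [ih (fun x hx => hl x (List.mem_cons_of_mem _ hx)),
        pv_val_digitChar d (hl d List.mem_cons_self)]
    push_cast
    ring

-- Nat.toDigitsCore with enough fuel produces the reversed digit list (as chars) in front of the accumulator
lemma pv_toDigitsCore_eq (n : Nat) : ∀ fuel ds, n < fuel → 0 < n →
    Nat.toDigitsCore 10 fuel n ds = ((Nat.digits 10 n).reverse.map Nat.digitChar) ++ ds := by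
  induction n using Nat.strong_induction_on with
  | _ n ih =>
    intro fuel ds hfuel hn
    match fuel with
    | 0 => omega
    | f + 1 =>
      rw [Nat.toDigitsCore]
      by_cases h0 : n / 10 = 0
      · simp [h0, Nat.digits_def' (by norm_num : 1 < 10) hn]
      · rw [if_neg h0]
        have hlt : n / 10 < n := Nat.div_lt_self hn (by norm_num)
        rw [ih (n / 10) hlt f _ (by omega) (Nat.pos_of_ne_zero h0),
          Nat.digits_def' (by norm_num : 1 < 10) hn]
        simp

lemma pv_toDigits_eq (n : Nat) (hn : 0 < n) :
    Nat.toDigits 10 n = (Nat.digits 10 n).reverse.map Nat.digitChar := by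
  rw [Nat.toDigits, pv_toDigitsCore_eq n (n + 1) [] (by omega) hn]
  simp

-- B computes the base-10 digit sum of |numero|
lemma pv_alt_eq (numero : Int) :
    sumar_digitos_alt numero = ↑((Nat.digits 10 numero.natAbs).sum) := by
  unfold sumar_digitos_alt
  rw [Int.abs_eq_natAbs]
  generalize numero.natAbs = m
  have htc : (PySem.Int.toStr ((m : Nat) : Int)).toList = Nat.toDigits 10 m := by
    rw [PySem.Int.toList_toStr]
    simp [PySem.Int.toChars]
  rw [htc]
  by_cases hm0 : 0 < m
  · rw [pv_toDigits_eq m hm0,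
      pv_fold_digits _ (fun d hd => Nat.digits_lt_base (by norm_num) (List.mem_reverse.mp hd)) 0]
    simp
  · have h : m = 0 := by omega
    subst h
    decide

-- ===== VERDICT (by name: the statement is the Claim_ definition above) =====
theorem sumar_digitos_spec : Claim_equal_sumar_digitos := by
  intro numero _
  unfold Spec_sumar_digitos sumar_digitos
  rw [pv_alt_eq, Int.abs_eq_natAbs, pvLoopA_eq numero.natAbs 0, zero_add]
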